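-- pv_equiv track=rewrite | github.com/NKIdehara/Velocidade_e_Qualidade_com_Estruturas_de_Dados_e_Algoritmos | TP1/Ex06.py | encontra_quadrado
-- ===== SOURCE A (Python) =====
-- def encontra_quadrado(graos):
--     quadrado = 1
--     num_graos = 1
--     for i in range(2, 64):
--         num_graos = num_graos * 2
--         if num_graos >= graos:
--             quadrado = i
--             break
--     return quadrado
-- ===== SOURCE B (Python) =====
-- def encontra_quadrado(graos):
--     if graos <= 2:
--         return 2
--     return (graos - 1).bit_length() + 1
-- ===== Notes on version B (the rewrite author's own statement) =====
-- stated objective: idiomatic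
-- what changed: Replaces the doubling loop over squares 2..63 with a closed-form answer computed from the bit length of graos-1.
import Mathlib
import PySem

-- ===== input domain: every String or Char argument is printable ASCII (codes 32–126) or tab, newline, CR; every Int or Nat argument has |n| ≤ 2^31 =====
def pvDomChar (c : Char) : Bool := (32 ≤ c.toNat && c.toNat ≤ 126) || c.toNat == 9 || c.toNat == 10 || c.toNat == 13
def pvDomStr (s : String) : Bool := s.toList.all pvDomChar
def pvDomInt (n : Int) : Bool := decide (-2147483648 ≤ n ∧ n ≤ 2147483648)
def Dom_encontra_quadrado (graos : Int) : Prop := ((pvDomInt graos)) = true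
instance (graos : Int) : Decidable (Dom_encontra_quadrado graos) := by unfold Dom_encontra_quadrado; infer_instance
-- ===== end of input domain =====

-- B replaces A's doubling loop by the closed form (graos-1).bit_length()+1 (idiomatic, O(1)).

-- ===== PORT A =====
-- the for-loop over range(2, 64) with its break: quadrado starts at 1, num_graos doubles each step
def pvEncQLoop (graos : Int) : List Int → Int → Int → Int
  | [], quadrado, _ => quadrado
  | i :: rest, quadrado, num_graos =>
      let num' := num_graos * 2
      if num' ≥ graos then i else pvEncQLoop graos rest quadrado num'

def encontra_quadrado (graos : Int) : Int :=
  pvEncQLoop graos (PySem.List.pyRange 2 64 1) 1 1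

-- ===== PORT B =====
def encontra_quadrado_alt (graos : Int) : Int :=
  if graos ≤ 2 then 2 else (PySem.Int.bitLength (graos - 1) : Int) + 1

-- ===== PRECONDITION & SPEC =====
def Spec_encontra_quadrado (graos : Int) (out : Int) : Prop := out = encontra_quadrado_alt graos
instance (graos : Int) (out : Int) : Decidable (Spec_encontra_quadrado graos out) := by unfold Spec_encontra_quadrado; infer_instance

-- ===== CLAIM (what is proved, stated in full; the proofs are below) =====
def Claim_equal_encontra_quadrado : Prop := ∀ (graos : Int), Dom_encontra_quadrado graos → Spec_encontra_quadrado graos (encontra_quadrado graos)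

-- ===== LEMMAS AND PROOFS =====

-- The loop, entered at square k with num_graos = 2^(k-2), returns t — the first square
-- whose grain count 2^(t-1) reaches graos — as long as t ≤ 63.
lemma pvEncQLoop_eq (graos : Int) (t : ℕ) (ht : t ≤ 63)
    (hbrk : graos ≤ 2 ^ (t - 1))
    (hmin : ∀ j : ℕ, 2 ≤ j → j < t → (2 : Int) ^ (j - 1) < graos) :
    ∀ d k : ℕ, 2 ≤ k → k + d = t →
      pvEncQLoop graos (PySem.List.pyRange (k : Int) 64 1) 1 (2 ^ (k - 2)) = (t : Int) := by
  intro d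
  induction d with
  | zero =>
      intro k hk2 hkt
      have hkt' : k = t := by omega
      subst hkt'
      rw [PySem.List.pyRange_one_cons (by exact_mod_cast (by omega : (k : Int) < 64))]
      have hpow : (2 : Int) ^ (k - 2) * 2 = 2 ^ (k - 1) := by
        rw [← pow_succ]; congr 1; omega
      simp only [pvEncQLoop, hpow, ge_iff_le]
      rw [if_pos hbrk]
  | succ d ih =>
      intro k hk2 hkt
      rw [PySem.List.pyRange_one_cons (by exact_mod_cast (by omega : (k : Int) < 64))]
      have hpow : (2 : Int) ^ (k - 2) * 2 = 2 ^ (k - 1) := by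
        rw [← pow_succ]; congr 1; omega
      simp only [pvEncQLoop, hpow]
      rw [if_neg (by exact not_le.mpr (hmin k hk2 (by omega)))]
      have hcast : (k : Int) + 1 = ((k + 1 : ℕ) : Int) := by push_cast; ring
      rw [hcast]
      have hpow2 : (2 : Int) ^ (k - 1) = 2 ^ (k + 1 - 2) := rfl
      rw [hpow2]
      exact ih (k + 1) (by omega) (by omega)

-- ===== VERDICT (by name: the statement is the Claim_ definition above) =====
theorem encontra_quadrado_spec : Claim_equal_encontra_quadrado := by
  intro graos hdom
  unfold Spec_encontra_quadrado encontra_quadrado encontra_quadrado_alt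
  have hdom' : graos ≤ 2147483648 := by
    simp only [Dom_encontra_quadrado, pvDomInt, decide_eq_true_eq] at hdom
    exact hdom.2
  by_cases hle : graos ≤ 2
  · rw [if_pos hle]
    rw [PySem.List.pyRange_one_cons (by norm_num)]
    simp only [pvEncQLoop]
    rw [if_pos (by omega)]
  · rw [if_neg hle]
    rw [not_le] at hle
    set L := PySem.Int.bitLength (graos - 1) with hL
    have hne : graos - 1 ≠ 0 := by omega
    have habs : ((graos - 1).natAbs : Int) = graos - 1 := Int.natAbs_of_nonneg (by omega)
    have hlt : (graos - 1).natAbs < 2 ^ L := PySem.Int.lt_two_pow_bitLength (graos - 1)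
    have hge : 2 ^ (L - 1) ≤ (graos - 1).natAbs := PySem.Int.two_pow_bitLength_le (graos - 1) hne
    have habs_le : (graos - 1).natAbs ≤ 2 ^ 31 := by
      have h31 : (2:Int) ^ 31 = 2147483648 := by norm_num
      omega
    have hL1 : 1 ≤ L := by
      by_contra h
      have : L = 0 := by omega
      rw [this] at hlt
      omega
    have hLle : L ≤ 32 := by
      have := le_trans hge habs_le
      have := (Nat.pow_le_pow_iff_right (by norm_num : 1 < 2)).mp this
      omega
    have hbrk : graos ≤ 2 ^ (L + 1 - 1) := by
      have : ((graos - 1).natAbs : Int) < ((2 ^ L : ℕ) : Int) := by exact_mod_cast hlt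
      rw [habs] at this
      push_cast at this
      simpa using (by omega : graos ≤ 2 ^ L)
    have hmin : ∀ j : ℕ, 2 ≤ j → j < L + 1 → (2 : Int) ^ (j - 1) < graos := by
      intro j hj2 hjL
      have h1 : (2 : ℕ) ^ (j - 1) ≤ 2 ^ (L - 1) :=
        Nat.pow_le_pow_right (by norm_num) (by omega)
      have h2 : (2 : ℕ) ^ (j - 1) ≤ (graos - 1).natAbs := le_trans h1 hge
      have h3 : ((2 : ℕ) ^ (j - 1) : Int) ≤ graos - 1 := by
        rw [← habs]; exact_mod_cast h2
      push_cast at h3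
      omega
    have := pvEncQLoop_eq graos (L + 1) (by omega) hbrk hmin (L - 1) 2 (by omega) (by omega)
    rw [show ((2:ℕ):Int) = 2 from rfl, show (2:ℕ) - 2 = 0 from rfl, pow_zero] at this
    rw [this]
    push_cast
    ring
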